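-- pv_equiv track=rewrite | github.com/pypi-data/pypi-mirror-404 | packages/moai-adk/moai_adk-1.13.0-py3-none-any.whl/moai_adk/foundation/database.py | _sort_columns_for_composite
-- ===== SOURCE A (Python) =====
-- from typing import Any, Dict, List, Optional
--
-- def _sort_columns_for_composite(columns: List[str], conditions: List[str]) -> List[str]:
--     """Sort columns for composite index (equality columns first)."""
--     equality_cols = []
--     range_cols = []
--
--     for col in columns:
--         # Check if column is used in equality condition
--         is_equality = any(f"{col} = " in cond for cond in conditions)
--         if is_equality:
--             equality_cols.append(col)
--         else:
--             range_cols.append(col)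
--
--     return equality_cols + range_cols
-- ===== SOURCE B (Python) =====
-- def _sort_columns_for_composite(columns, conditions):
--     """Sort columns for composite index (equality columns first) via one stable sort."""
--     return sorted(columns, key=lambda col: 0 if any(f"{col} = " in cond for cond in conditions) else 1)
-- ===== Notes on version B (the rewrite author's own statement) =====
-- stated objective: idiomatic
-- what changed: Replaces the explicit two-accumulator partition loop with a single stable sort keyed 0/1 on the same equality-substring predicate; stability makes the result identical.
import Mathlib
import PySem

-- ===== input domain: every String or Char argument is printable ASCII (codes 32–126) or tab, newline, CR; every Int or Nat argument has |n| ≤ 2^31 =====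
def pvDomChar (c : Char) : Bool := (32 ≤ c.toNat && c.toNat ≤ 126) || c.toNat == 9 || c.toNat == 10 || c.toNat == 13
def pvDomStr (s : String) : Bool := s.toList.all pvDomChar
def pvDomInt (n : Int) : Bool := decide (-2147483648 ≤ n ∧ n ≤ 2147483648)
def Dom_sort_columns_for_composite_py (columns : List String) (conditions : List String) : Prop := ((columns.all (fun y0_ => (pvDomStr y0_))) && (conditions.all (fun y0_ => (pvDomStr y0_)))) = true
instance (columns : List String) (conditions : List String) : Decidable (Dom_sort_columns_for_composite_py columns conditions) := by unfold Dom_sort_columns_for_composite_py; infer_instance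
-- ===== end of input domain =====

-- B replaces A's two-accumulator partition loop with one stable sort keyed 0/1
-- on the same substring predicate (idiomatic; same return value, no side effects).

-- ===== PORT A =====
-- the per-column equality test 'any(f"{col} = " in cond for cond in conditions)'
def pvIsEquality (conditions : List String) (col : String) : Bool :=
  conditions.any (fun cond => PySem.Str.isIn (col ++ " = ") cond)

def sort_columns_for_composite_py (columns : List String) (conditions : List String) : List String :=
  let r := columns.foldl
    (fun (acc : List String × List String) col =>
      if pvIsEquality conditions col then (acc.1 ++ [col], acc.2)
      else (acc.1, acc.2 ++ [col]))
    ([], [])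
  r.1 ++ r.2

-- ===== PORT B =====
-- 'sorted(columns, key=lambda col: 0 if any(f"{col} = " in cond for cond in conditions) else 1)'
def pvKey (conditions : List String) (col : String) : Int :=
  if pvIsEquality conditions col then 0 else 1

def sort_columns_for_composite_py_alt (columns : List String) (conditions : List String) : List String :=
  PySem.List.sorted columns (pvKey conditions) false

-- ===== PRECONDITION & SPEC =====
def Spec_sort_columns_for_composite_py (columns : List String) (conditions : List String) (out : List String) : Prop := out = sort_columns_for_composite_py_alt columns conditions
instance (columns : List String) (conditions : List String) (out : List String) : Decidable (Spec_sort_columns_for_composite_py columns conditions out) := by unfold Spec_sort_columns_for_composite_py; infer_instance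

-- ===== CLAIM (what is proved, stated in full; the proofs are below) =====
def Claim_equal_sort_columns_for_composite_py : Prop := ∀ (columns : List String) (conditions : List String), Dom_sort_columns_for_composite_py columns conditions → Spec_sort_columns_for_composite_py columns conditions (sort_columns_for_composite_py columns conditions)

-- ===== LEMMAS AND PROOFS =====

-- insertBy puts x right between a prefix it does not go before and a suffix it goes before
lemma insertBy_mid {α : Type} (before : α → α → Bool) (x : α) :
    ∀ (eqs rngs : List α), (∀ y ∈ eqs, before x y = false) → (∀ y ∈ rngs, before x y = true) →
    PySem.List.insertBy before x (eqs ++ rngs) = eqs ++ x :: rngs := by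
  intro eqs
  induction eqs with
  | nil =>
      intro rngs _ hr
      cases rngs with
      | nil => simp [PySem.List.insertBy]
      | cons r rs => simp [PySem.List.insertBy, hr r (by simp)]
  | cons e es ih =>
      intro rngs he hr
      have h0 : before x e = false := he e (by simp)
      simpa [PySem.List.insertBy, h0] using ih rngs (fun y hy => he y (by simp [hy])) hr

-- the insertion-sort fold with a 0/1 key is the stable partition
lemma foldl_insertBy_partition (p : String → Bool)
    (k : String → Int) (hk : ∀ x, k x = if p x then 0 else 1) :
    ∀ (xs eqs rngs : List String), (∀ y ∈ eqs, p y = true) → (∀ y ∈ rngs, p y = false) →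
    xs.foldl (fun acc x => PySem.List.insertBy (fun a b => decide (k a < k b)) x acc) (eqs ++ rngs)
      = (eqs ++ xs.filter p) ++ (rngs ++ xs.filter (fun x => !p x)) := by
  intro xs
  induction xs with
  | nil => intro eqs rngs _ _; simp
  | cons x xs ih =>
      intro eqs rngs he hr
      by_cases hx : p x = true
      · have hstep : PySem.List.insertBy (fun a b => decide (k a < k b)) x (eqs ++ rngs)
            = (eqs ++ [x]) ++ rngs := by
          rw [insertBy_mid]
          · simp
          · intro y hy; simp [hk, hx, he y hy]
          · intro y hy; simp [hk, hx, hr y hy]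
        have he' : ∀ y ∈ eqs ++ [x], p y = true := by
          intro y hy
          rcases List.mem_append.1 hy with h | h
          · exact he y h
          · simp at h; simpa [h] using hx
        simp only [List.foldl_cons, hstep]
        rw [ih (eqs ++ [x]) rngs he' hr]
        simp [hx]
      · have hx' : p x = false := by simpa using hx
        have hstep : PySem.List.insertBy (fun a b => decide (k a < k b)) x (eqs ++ rngs)
            = eqs ++ (rngs ++ [x]) := by
          rw [← List.append_assoc, PySem.List.insertBy_of_forall_not_before]
          intro y hy
          rcases List.mem_append.1 hy with h | h
          · simp [hk, hx', he y h]
          · simp [hk, hx', hr y h]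
        have hr' : ∀ y ∈ rngs ++ [x], p y = false := by
          intro y hy
          rcases List.mem_append.1 hy with h | h
          · exact hr y h
          · simp at h; simp [h, hx']
        simp only [List.foldl_cons, hstep]
        rw [ih eqs (rngs ++ [x]) he hr']
        simp [hx']

-- A's two-accumulator fold is the pair of filters
lemma foldl_pair_filter (p : String → Bool) :
    ∀ (xs : List String) (l1 l2 : List String),
    xs.foldl (fun (acc : List String × List String) col =>
        if p col then (acc.1 ++ [col], acc.2) else (acc.1, acc.2 ++ [col])) (l1, l2)
      = (l1 ++ xs.filter p, l2 ++ xs.filter (fun x => !p x)) := by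
  intro xs
  induction xs with
  | nil => intro l1 l2; simp
  | cons x xs ih =>
      intro l1 l2
      by_cases hx : p x = true
      · simp [hx, ih]
      · have hx' : p x = false := by simpa using hx
        simp [hx', ih]

-- ===== VERDICT (by name: the statement is the Claim_ definition above) =====
theorem sort_columns_for_composite_py_spec : Claim_equal_sort_columns_for_composite_py := by
  intro columns conditions _
  unfold Spec_sort_columns_for_composite_py sort_columns_for_composite_py sort_columns_for_composite_py_alt
  rw [PySem.List.sorted_eq_foldl_insertBy]
  have hA := foldl_pair_filter (pvIsEquality conditions) columns [] []
  have hB := foldl_insertBy_partition (pvIsEquality conditions) (pvKey conditions)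
    (fun _ => rfl) columns [] [] (by simp) (by simp)
  simp only [List.nil_append] at hA hB
  simp [hA, hB]
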